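-- pv_equiv track=rewrite | github.com/Git-fighters/cs107-FinalProject | gitfighters/parsing.py | no_unwanted_symbols
-- ===== SOURCE A (Python) =====
-- def flatten(l):
--     """This function takes a list and flattens it if there are any other list elements in it
--
--     INPUTS
--     =======
--     l: any list
--
--     RETURNS
--     ========
--     list: flattened list
--
--
--     EXAMPLES
--     =========
--     >>> flatten(['2', '+', 'sin', '(', 'x', ')', '-', '3y', ['x', '2'], ['y', '3']])
--     >>> ['2', '+', 'sin', '(', 'x', ')', '-', '3y', 'x', '2', 'y', '3']
--
--     """
--
--     flattened = []
--     for x in l: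
--         if isinstance(x, list):
--             flattened.extend(x)
--         else:
--             flattened.append(x)
--
--     return flattened
--
-- def no_unwanted_symbols(filtered_sentence):
--     """Cleans the string further. Gets rid of equal signs and some unneccessary punctuation.
--
--     INPUTS
--     =======
--     filtered_sentence: a list of tokenized parts of the user input
--
--     RETURNS
--     ========
--     list: a list of tokenized parts of the sentence but all cleaned
--
--     EXAMPLES
--     =========
--     >>> no_unwanted_symbols('x^2 + 2x - 3y when x= 1, y=3')
--     >>> ['x^2', '+', '2x', '-', '3y', 'x', '1', 'y', '3']
--
--     """
--
--     for i in range(len(filtered_sentence)):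
--
--         a = filtered_sentence[i]
--         ## get rid of comma
--         filtered_sentence[i] = a.replace(',', '')
--
--         ## take out the equal signs
--         if '=' in a:
--             splitted = a.split('=')
--             filtered_sentence[i] = splitted
--
--     ## make sure there are no empty strings left in the list
--
--     filtered_sentence = [i for i in filtered_sentence if i != '']
--     filtered_sentence = flatten(filtered_sentence)
--
--     return filtered_sentence
-- ===== SOURCE B (Python) =====
-- def no_unwanted_symbols(filtered_sentence):
--     result = []
--     for a in filtered_sentence:
--         if '=' in a:
--             result += a.split('=')
--         else:
--             cleaned = a.replace(',', '')
--             if cleaned != '':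
--                 result += [cleaned]
--     return result
-- ===== Notes on version B (the rewrite author's own statement) =====
-- stated objective: simpler
-- what changed: Replaces A's three passes (index loop mutating the list in place to a mixed str/list list, an empty-string filter comprehension, and a flatten helper) by one single pass that builds the result list directly; note A mutates its argument in place while B does not (return value only).
import Mathlib
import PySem

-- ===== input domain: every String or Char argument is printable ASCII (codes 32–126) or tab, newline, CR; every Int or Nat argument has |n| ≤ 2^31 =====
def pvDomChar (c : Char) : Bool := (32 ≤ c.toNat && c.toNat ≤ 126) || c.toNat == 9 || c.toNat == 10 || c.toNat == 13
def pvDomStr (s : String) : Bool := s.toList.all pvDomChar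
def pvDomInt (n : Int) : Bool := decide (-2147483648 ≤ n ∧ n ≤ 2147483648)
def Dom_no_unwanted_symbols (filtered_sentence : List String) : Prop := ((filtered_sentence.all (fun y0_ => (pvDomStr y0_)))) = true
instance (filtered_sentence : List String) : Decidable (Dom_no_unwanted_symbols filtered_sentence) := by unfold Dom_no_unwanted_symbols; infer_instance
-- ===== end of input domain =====

-- B folds A's three passes (in-place index-loop rewrite, empty-string filter, flatten helper)
-- into one pass building a fresh list; equivalence is about the RETURN value only (A mutates its argument).


-- ===== PORT A =====
-- A's list holds strings or (after an '='-split) lists of strings: model the element as a sum.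
-- flatten helper, transliterated (only Sum.inr elements are Python lists)
def pvFlatten (l : List (Sum String (List String))) : List String :=
  l.foldl (fun flattened x =>
    match x with
    | Sum.inr xs => flattened ++ xs
    | Sum.inl s => flattened ++ [s]) []

def no_unwanted_symbols (filtered_sentence : List String) : List String :=
  -- for i in range(len(filtered_sentence)): read [i], write [i]
  let l1 : List (Sum String (List String)) :=
    (PySem.List.pyRange 0 (filtered_sentence.length : Int) 1).foldl
      (fun acc i =>
        match PySem.List.pyGet? acc i with
        | some (Sum.inl a) =>
          let acc1 := acc.set i.toNat (Sum.inl (PySem.Str.replace a "," ""))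
          if PySem.Str.isIn "=" a then
            acc1.set i.toNat (Sum.inr ((PySem.Str.split? a "=").getD []))
          else acc1
        | _ => acc)  -- unreachable: every index read is in range and still a string
      (filtered_sentence.map Sum.inl)
  let l2 := l1.filter (fun x =>
    match x with
    | Sum.inl s => s != ""   -- Python: a list element is never == ''
    | Sum.inr _ => true)
  pvFlatten l2

-- ===== PORT B =====
def no_unwanted_symbols_alt (filtered_sentence : List String) : List String :=
  filtered_sentence.foldl (fun result a =>
    if PySem.Str.isIn "=" a then
      result ++ (PySem.Str.split? a "=").getD []
    else
      let cleaned := PySem.Str.replace a "," ""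
      if cleaned != "" then result ++ [cleaned] else result) []

-- ===== PRECONDITION & SPEC =====
def Spec_no_unwanted_symbols (filtered_sentence : List String) (out : List String) : Prop := out = no_unwanted_symbols_alt filtered_sentence
instance (filtered_sentence : List String) (out : List String) : Decidable (Spec_no_unwanted_symbols filtered_sentence out) := by unfold Spec_no_unwanted_symbols; infer_instance

-- ===== CLAIM (what is proved, stated in full; the proofs are below) =====
def Claim_equal_no_unwanted_symbols : Prop := ∀ (filtered_sentence : List String), Dom_no_unwanted_symbols filtered_sentence → Spec_no_unwanted_symbols filtered_sentence (no_unwanted_symbols filtered_sentence)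

-- ===== LEMMAS AND PROOFS =====

-- the net effect of one iteration of A's loop on position i
def pvStep (a : String) : Sum String (List String) :=
  if PySem.Str.isIn "=" a then Sum.inr ((PySem.Str.split? a "=").getD [])
  else Sum.inl (PySem.Str.replace a "," "")

-- A's loop body as a named function
def pvUpd (acc : List (Sum String (List String))) (i : Int) : List (Sum String (List String)) :=
  match PySem.List.pyGet? acc i with
  | some (Sum.inl a) =>
    let acc1 := acc.set i.toNat (Sum.inl (PySem.Str.replace a "," ""))
    if PySem.Str.isIn "=" a then
      acc1.set i.toNat (Sum.inr ((PySem.Str.split? a "=").getD []))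
    else acc1
  | _ => acc

lemma pvLoop_gen (suf : List String) (pref : List (Sum String (List String))) :
    (PySem.List.pyRange (pref.length : Int) ((pref.length : Int) + suf.length) 1).foldl
      pvUpd (pref ++ suf.map Sum.inl)
    = pref ++ suf.map pvStep := by
  induction suf generalizing pref with
  | nil => simp [PySem.List.pyRange_one_eq_nil]
  | cons a rest ih =>
    rw [PySem.List.pyRange_one_cons (by simp)]
    have hget : PySem.List.pyGet? (pref ++ (a :: rest).map Sum.inl) (pref.length : Int)
        = some (Sum.inl a) := by
      rw [List.map_cons]
      exact PySem.List.pyGet?_append_length pref (rest.map Sum.inl) (Sum.inl a)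
    have hset : ∀ x, (pref ++ (a :: rest).map Sum.inl).set pref.length x
        = pref ++ x :: rest.map Sum.inl := by
      intro x
      rw [List.map_cons, List.set_append_right _ _ (le_refl _)]
      simp
    have hbody : pvUpd (pref ++ (a :: rest).map Sum.inl) (pref.length : Int)
        = pref ++ pvStep a :: rest.map Sum.inl := by
      unfold pvUpd pvStep
      rw [hget]
      simp only [Int.toNat_natCast]
      split_ifs with h
      · rw [List.set_set, hset]
      · rw [hset]
    rw [List.foldl_cons, hbody]
    have key := ih (pref ++ [pvStep a])
    have harr : ((pref.length : Int) + 1) = (((pref ++ [pvStep a]).length : Nat) : Int) := by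
      simp
    have harr2 : ((pref.length : Int) + ((a :: rest).length : Nat))
        = (((pref ++ [pvStep a]).length : Nat) : Int) + (rest.length : Nat) := by
      simp; ring
    rw [harr, harr2]
    have hlist : pref ++ pvStep a :: rest.map Sum.inl
        = (pref ++ [pvStep a]) ++ rest.map Sum.inl := by simp
    rw [hlist, key]
    simp

lemma pvLoop (fs : List String) :
    (PySem.List.pyRange 0 (fs.length : Int) 1).foldl pvUpd (fs.map Sum.inl)
    = fs.map pvStep := by
  have := pvLoop_gen fs []
  simpa using this

-- filter + flatten over the stepped list is exactly B's single pass
lemma pvTail (fs : List String) (acc : List String) :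
    ((fs.map pvStep).filter (fun x =>
      match x with
      | Sum.inl s => s != ""
      | Sum.inr _ => true)).foldl (fun flattened x =>
        match x with
        | Sum.inr xs => flattened ++ xs
        | Sum.inl s => flattened ++ [s]) acc
    = fs.foldl (fun result a =>
        if PySem.Str.isIn "=" a then
          result ++ (PySem.Str.split? a "=").getD []
        else
          let cleaned := PySem.Str.replace a "," ""
          if cleaned != "" then result ++ [cleaned] else result) acc := by
  induction fs generalizing acc with
  | nil => rfl
  | cons a rest ih =>
    by_cases h : PySem.Str.isIn "=" a
    · have hs : pvStep a = Sum.inr ((PySem.Str.split? a "=").getD []) := by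
        unfold pvStep; rw [if_pos h]
      rw [List.map_cons, hs, List.filter_cons, List.foldl_cons, if_pos h]
      exact ih (acc ++ (PySem.Str.split? a "=").getD [])
    · have hs : pvStep a = Sum.inl (PySem.Str.replace a "," "") := by
        unfold pvStep; rw [if_neg h]
      rw [List.map_cons, hs, List.filter_cons, List.foldl_cons, if_neg h]
      by_cases hc : PySem.Str.replace a "," "" = ""
      · simp only [hc, bne_self_eq_false, Bool.false_eq_true, if_false]
        exact ih acc
      · have hb : (PySem.Str.replace a "," "" != "") = true := by
          simpa using hc
        simp only [hb, if_true, List.foldl_cons]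
        exact ih (acc ++ [PySem.Str.replace a "," ""])

-- ===== VERDICT (by name: the statement is the Claim_ definition above) =====
theorem no_unwanted_symbols_spec : Claim_equal_no_unwanted_symbols := by
  intro fs _
  show no_unwanted_symbols fs = no_unwanted_symbols_alt fs
  have h1 : no_unwanted_symbols fs
      = pvFlatten ((fs.map pvStep).filter (fun x =>
          match x with
          | Sum.inl s => s != ""
          | Sum.inr _ => true)) := by
    show pvFlatten ((((PySem.List.pyRange 0 (fs.length : Int) 1).foldl pvUpd
        (fs.map Sum.inl))).filter (fun x =>
          match x with
          | Sum.inl s => s != ""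
          | Sum.inr _ => true)) = _
    rw [pvLoop fs]
  rw [h1]
  exact pvTail fs []
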